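-- pv_equiv track=rewrite | github.com/m1sterzer0/DaveProgrammingCompetitions | hackercup/python/2017/1_B.py | solve
-- ===== SOURCE A (Python) =====
-- def solve(N,R,X,Y) :
--     s = set()
--     for x in X :
--         for y in Y :
--             ans = 0
--             for (i,(x2,y2)) in enumerate(zip(X,Y)) :
--                 if x2 >= x and y2 >= y and x2 <= x + R and y2 <= y + R : ans |= 1<<i
--             s.add(ans)
--     ls = [x for x in s]
--     best = 0
--     for i in range(len(ls)) :
--         v1 = ls[i]
--         for j in range(i,len(ls)) :
--             cand = v1 | ls[j]
--             best = max(best,bin(cand).count('1'))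
--     return best
-- ===== SOURCE B (Python) =====
-- def solve(N, R, X, Y):
--     pts = list(zip(X, Y))
--
--     def inside(cx, cy, p):
--         return cx <= p[0] <= cx + R and cy <= p[1] <= cy + R
--
--     corners = [(x, y) for x in X for y in Y]
--     best = 0
--     for c1 in corners:
--         for c2 in corners:
--             c = sum(1 for p in pts
--                     if inside(c1[0], c1[1], p) or inside(c2[0], c2[1], p))
--             best = max(best, c)
--     return best
-- ===== Notes on version B (the rewrite author's own statement) =====
-- stated objective: simpler
-- what changed: B drops A's bitmask signatures, the dedup set and the popcount-of-OR pair scan: it enumerates ordered pairs of candidate corners directly and counts the points covered by either square in one plain pass per pair (shorter and bit-trick-free, but slower on large inputs since nothing is deduplicated or bit-parallel).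
import Mathlib
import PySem

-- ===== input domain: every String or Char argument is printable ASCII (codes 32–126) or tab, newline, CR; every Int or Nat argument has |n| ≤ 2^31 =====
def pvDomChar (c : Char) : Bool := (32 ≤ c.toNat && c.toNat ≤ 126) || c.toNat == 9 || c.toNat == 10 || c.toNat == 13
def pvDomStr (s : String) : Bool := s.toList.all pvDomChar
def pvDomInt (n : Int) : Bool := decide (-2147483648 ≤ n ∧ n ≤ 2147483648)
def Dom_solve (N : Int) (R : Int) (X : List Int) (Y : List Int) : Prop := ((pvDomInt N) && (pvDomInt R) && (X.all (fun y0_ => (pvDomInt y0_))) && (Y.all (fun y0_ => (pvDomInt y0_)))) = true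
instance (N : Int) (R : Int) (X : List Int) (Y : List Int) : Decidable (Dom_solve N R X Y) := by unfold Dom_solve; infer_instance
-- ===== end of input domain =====

-- B replaces A's bitmask/dedup-set/popcount pipeline by directly counting, for each ordered pair of
-- candidate corners, the points covered by either square (objective: alternative, similar cost).
-- A's comprehension over the Python set is consumed order-independently (a max of a symmetric
-- function over all index pairs), so the port may use PySem.Set's first-insertion order.

-- ===== PORT A =====
-- mask of the points of zip(X,Y) covered by the R-square with lower-left corner (x,y); 'ans |= 1<<i'
-- (the enumerate index i is ≥ 0 always, so '1<<i' is exactly '(1:Int) <<< i.toNat')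
def maskA (R : Int) (pts : List (Int × Int)) (x y : Int) : Int :=
  (PySem.List.enumerate pts).foldl
    (fun ans ip =>
      if ip.2.1 ≥ x ∧ ip.2.2 ≥ y ∧ ip.2.1 ≤ x + R ∧ ip.2.2 ≤ y + R then
        PySem.Int.bor ans ((1 : Int) <<< ip.1.toNat)
      else ans) 0

-- 'bin(cand).count("1")' is exactly PySem.Int.bitCount (the '0b' prefix and a sign add no '1' digit)
def solve (N : Int) (R : Int) (X : List Int) (Y : List Int) : Int :=
  let s : PySem.Set Int :=
    X.foldl (fun s x => Y.foldl (fun s y => PySem.Set.add s (maskA R (X.zip Y) x y)) s)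
      PySem.Set.empty
  let ls : List Int := s
  let n : Int := (ls.length : Int)
  (PySem.List.pyRange 0 n 1).foldl
    (fun best i =>
      let v1 := PySem.List.pyGetD ls i 0
      (PySem.List.pyRange i n 1).foldl
        (fun best j =>
          max best ((PySem.Int.bitCount (PySem.Int.bor v1 (PySem.List.pyGetD ls j 0)) : Nat) : Int))
        best)
    0

-- ===== PORT B =====
def insideB (R cx cy : Int) (p : Int × Int) : Bool :=
  decide (cx ≤ p.1 ∧ p.1 ≤ cx + R ∧ cy ≤ p.2 ∧ p.2 ≤ cy + R)

-- 'sum(1 for p in pts if cond(p))' is the count of the points satisfying cond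
def solve_alt (N : Int) (R : Int) (X : List Int) (Y : List Int) : Int :=
  let pts := X.zip Y
  let corners := X.flatMap (fun x => Y.map (fun y => (x, y)))
  corners.foldl
    (fun best c1 =>
      corners.foldl
        (fun best c2 =>
          max best
            ((pts.countP (fun p => insideB R c1.1 c1.2 p || insideB R c2.1 c2.2 p) : Nat) : Int))
        best)
    0

-- ===== PRECONDITION & SPEC =====
def Spec_solve (N : Int) (R : Int) (X : List Int) (Y : List Int) (out : Int) : Prop := out = solve_alt N R X Y
instance (N : Int) (R : Int) (X : List Int) (Y : List Int) (out : Int) : Decidable (Spec_solve N R X Y out) := by unfold Spec_solve; infer_instance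

-- ===== CLAIM (what is proved, stated in full; the proofs are below) =====
def Claim_equal_solve : Prop := ∀ (N : Int) (R : Int) (X : List Int) (Y : List Int), Dom_solve N R X Y → Spec_solve N R X Y (solve N R X Y)

-- ===== LEMMAS AND PROOFS =====

-- Nat-valued mask with an explicit start index, for bit-level reasoning about maskA
def maskN (P : Int × Int → Bool) : List (Int × Int) → Nat → Nat
  | [], _ => 0
  | p :: t, k => (if P p then 1 <<< k else 0) ||| maskN P t (k + 1)

def hitP (R x y : Int) (p : Int × Int) : Bool :=
  decide (p.1 ≥ x ∧ p.2 ≥ y ∧ p.1 ≤ x + R ∧ p.2 ≤ y + R)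

lemma one_shl_cast (s : Nat) : ((1:Int) <<< ((s:Nat):Int)) = ((1 <<< s : Nat) : Int) := by
  simp only [HShiftLeft.hShiftLeft, ShiftLeft.shiftLeft]
  rw [← Int.ofNat_eq_natCast]
  simp [Nat.shiftLeft'_false, Int.ofNat_eq_natCast]

lemma maskA_fold (R x y : Int) (pts : List (Int × Int)) (s acc : Nat) :
    (PySem.List.enumerate pts (s : Int)).foldl
      (fun ans ip =>
        if ip.2.1 ≥ x ∧ ip.2.2 ≥ y ∧ ip.2.1 ≤ x + R ∧ ip.2.2 ≤ y + R then
          PySem.Int.bor ans ((1 : Int) <<< ip.1.toNat)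
        else ans) (acc : Int)
    = ((acc ||| maskN (hitP R x y) pts s : Nat) : Int) := by
  induction pts generalizing s acc with
  | nil => simp [PySem.List.enumerate_nil, maskN]
  | cons p t ih =>
    rw [PySem.List.enumerate_cons]
    simp only [List.foldl_cons]
    have h1 : ((s : Int) + 1) = ((s + 1 : Nat) : Int) := by push_cast; ring
    by_cases h : p.1 ≥ x ∧ p.2 ≥ y ∧ p.1 ≤ x + R ∧ p.2 ≤ y + R
    · rw [if_pos h]
      have h2 : PySem.Int.bor (acc : Int) ((1 : Int) <<< (((s:Int)).toNat : Int))
          = ((acc ||| (1 <<< s) : Nat) : Int) := by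
        rw [show ((s:Int)).toNat = s from Int.toNat_natCast s, one_shl_cast,
          PySem.Int.bor_natCast]
      rw [h2, h1, ih]
      congr 1
      have hp : hitP R x y p = true := by simp only [hitP, decide_eq_true_eq]; exact h
      simp [maskN, hp, Nat.or_assoc]
    · rw [if_neg h]
      rw [h1, ih]
      congr 1
      have hp : hitP R x y p = false := by
        simp only [hitP, decide_eq_false_iff_not]; exact h
      simp [maskN, hp]

lemma maskN_testBit (P : Int × Int → Bool) (l : List (Int × Int)) (s k : Nat) (d : Int × Int) :
    (maskN P l s).testBit k = (decide (s ≤ k ∧ k - s < l.length) && P (l.getD (k - s) d)) := by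
  induction l generalizing s with
  | nil => simp [maskN]
  | cons p t ih =>
    simp only [maskN, Nat.testBit_or, ih (s+1)]
    by_cases hks : k = s
    · subst hks
      have : (if P p then 1 <<< k else 0 : Nat).testBit k = P p := by
        by_cases hp : P p <;> simp [hp, Nat.testBit_shiftLeft]
      simp [this]
    · have h0 : (if P p then 1 <<< s else 0 : Nat).testBit k = false := by
        by_cases hp : P p <;> simp [hp, Nat.testBit_shiftLeft]
        intro hsk
        have : k - s ≠ 0 := by omega
        cases hx : k - s with
        | zero => omega
        | succ m => simp [Nat.testBit_succ]
      rw [h0]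
      simp only [Bool.false_or]
      by_cases hle : s + 1 ≤ k
      · have : k - (s+1) + 1 = k - s := by omega
        have hg : t.getD (k - (s+1)) d = (p :: t).getD (k - s) d := by
          rw [← this]; rfl
        rw [hg]
        congr 1
        simp only [decide_eq_decide, List.length_cons]
        omega
      · have h1 : decide (s < k) = false := by simp; omega
        have h2 : decide (s ≤ k) = false := by simp; omega
        simp [h1, h2]

lemma maskN_lt (P : Int × Int → Bool) (l : List (Int × Int)) (s : Nat) :
    maskN P l s < 2 ^ (s + l.length) := by
  induction l generalizing s with
  | nil => simp [maskN]
  | cons p t ih =>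
    simp only [maskN, List.length_cons]
    apply Nat.or_lt_two_pow
    · have hb : (1 <<< s : Nat) < 2 ^ (s + (t.length + 1)) := by
        rw [Nat.shiftLeft_eq]
        have : 2 ^ s < 2 ^ (s + (t.length + 1)) :=
          Nat.pow_lt_pow_right (by norm_num) (by omega)
        simpa using this
      by_cases hp : P p <;> simp [hp, hb]
    · have := ih (s + 1)
      calc maskN P t (s+1) < 2 ^ (s + 1 + t.length) := this
        _ ≤ 2 ^ (s + (t.length + 1)) := by apply Nat.pow_le_pow_right <;> omega

lemma bitCount_eq_countP (n : Nat) (m : Nat) (h : m < 2 ^ n) :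
    PySem.Int.bitCount (m : Int) = (List.range n).countP (fun k => m.testBit k) := by
  induction n generalizing m with
  | zero =>
    interval_cases m
    simp [PySem.Int.bitCount_zero]
  | succ n ih =>
    rcases Nat.eq_zero_or_pos m with hm | hm
    · subst hm; simp [PySem.Int.bitCount_zero]
    · rw [PySem.Int.bitCount_natCast hm]
      have hdiv : m / 2 < 2 ^ n := by
        have h2 : m / 2 < 2 ^ (n+1) / 2 := Nat.div_lt_div_of_lt_of_dvd ⟨2^n, by ring⟩ h
        have he : 2 ^ (n+1) / 2 = 2 ^ n := by
          rw [Nat.pow_succ, Nat.mul_div_cancel] ; norm_num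
        rwa [he] at h2
      rw [ih (m / 2) hdiv]
      rw [List.range_succ_eq_map]
      rw [List.countP_cons, List.countP_map]
      have hbit : ∀ k, ((fun k => m.testBit k) ∘ Nat.succ) k = (m / 2).testBit k := by
        intro k; simp [Function.comp, Nat.testBit_add_one]
      rw [List.countP_congr (fun k _ => by rw [← hbit k])]
      by_cases hb : m.testBit 0
      · have : m % 2 = 1 := by simpa [Nat.testBit_zero] using hb
        simp [hb, this]; omega
      · have : m % 2 = 0 := by
          rcases Nat.mod_two_eq_zero_or_one m with h2 | h2
          · exact h2
          · exfalso; apply hb; simp [Nat.testBit_zero, h2]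
        simp [hb, this]

lemma countP_range_getD {α : Type} (l : List α) (p : α → Bool) (d : α) :
    (List.range l.length).countP (fun k => p (l.getD k d)) = l.countP p := by
  induction l with
  | nil => simp
  | cons a t ih =>
    rw [List.length_cons, List.range_succ_eq_map, List.countP_cons, List.countP_map]
    have : ((fun k => p ((a :: t).getD k d)) ∘ Nat.succ) = (fun k => p (t.getD k d)) := by
      funext k; rfl
    rw [this, ih, List.countP_cons]
    simp [List.getD]

lemma maskA_eq (R x y : Int) (pts : List (Int × Int)) :
    maskA R pts x y = ((maskN (hitP R x y) pts 0 : Nat) : Int) := by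
  have := maskA_fold R x y pts 0 0
  simpa [maskA] using this

lemma hitP_eq_insideB (R x y : Int) (p : Int × Int) : hitP R x y p = insideB R x y p := by
  simp only [hitP, insideB, decide_eq_decide]
  constructor <;> intro h <;> tauto

-- popcount of the OR of two masks = count of points covered by either square
lemma pair_value (R : Int) (pts : List (Int × Int)) (x1 y1 x2 y2 : Int) :
    ((PySem.Int.bitCount (PySem.Int.bor (maskA R pts x1 y1) (maskA R pts x2 y2)) : Nat) : Int)
    = ((pts.countP (fun p => insideB R x1 y1 p || insideB R x2 y2 p) : Nat) : Int) := by
  rw [maskA_eq, maskA_eq, PySem.Int.bor_natCast]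
  set m1 := maskN (hitP R x1 y1) pts 0 with hm1
  set m2 := maskN (hitP R x2 y2) pts 0 with hm2
  have hlt : m1 ||| m2 < 2 ^ pts.length := by
    apply Nat.or_lt_two_pow
    · simpa using maskN_lt (hitP R x1 y1) pts 0
    · simpa using maskN_lt (hitP R x2 y2) pts 0
  rw [bitCount_eq_countP pts.length _ hlt]
  congr 1
  have hcg : ∀ k ∈ List.range pts.length,
      (m1 ||| m2).testBit k
        = (fun k => (fun p => insideB R x1 y1 p || insideB R x2 y2 p) (pts.getD k (0,0))) k := by
    intro k hk
    rw [List.mem_range] at hk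
    rw [Nat.testBit_or, hm1, hm2, maskN_testBit _ _ _ _ (0,0), maskN_testBit _ _ _ _ (0,0)]
    rw [hitP_eq_insideB, hitP_eq_insideB]
    simp [hk]
  rw [List.countP_congr (fun k hk' => by rw [hcg k hk'])]
  simpa using countP_range_getD pts (fun p => insideB R x1 y1 p || insideB R x2 y2 p) (0,0)

lemma mem_set_fold_inner (Y : List Int) (g : Int → Int) (s0 : PySem.Set Int) (m : Int) :
    m ∈ Y.foldl (fun s y => PySem.Set.add s (g y)) s0 ↔ m ∈ s0 ∨ ∃ y ∈ Y, m = g y := by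
  induction Y generalizing s0 with
  | nil => simp
  | cons a t ih =>
    simp only [List.foldl_cons, ih, PySem.Set.mem_add]
    constructor
    · rintro (⟨h | h⟩ | ⟨y, hy, rfl⟩)
      · exact Or.inl h
      · exact Or.inr ⟨a, by simp, h⟩
      · exact Or.inr ⟨y, by simp [hy], rfl⟩
    · rintro (h | ⟨y, hy, rfl⟩)
      · exact Or.inl (Or.inl h)
      · rcases List.mem_cons.mp hy with rfl | hy
        · exact Or.inl (Or.inr rfl)
        · exact Or.inr ⟨y, hy, rfl⟩

lemma mem_set_fold (X Y : List Int) (f : Int → Int → Int) (s0 : PySem.Set Int) (m : Int) :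
    m ∈ X.foldl (fun s x => Y.foldl (fun s y => PySem.Set.add s (f x y)) s) s0 ↔
      m ∈ s0 ∨ ∃ x ∈ X, ∃ y ∈ Y, m = f x y := by
  induction X generalizing s0 with
  | nil => simp
  | cons a t ih =>
    simp only [List.foldl_cons, ih, mem_set_fold_inner]
    constructor
    · rintro (⟨h | ⟨y, hy, rfl⟩⟩ | ⟨x, hx, y, hy, rfl⟩)
      · exact Or.inl h
      · exact Or.inr ⟨a, by simp, y, hy, rfl⟩
      · exact Or.inr ⟨x, by simp [hx], y, hy, rfl⟩
    · rintro (h | ⟨x, hx, y, hy, rfl⟩)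
      · exact Or.inl (Or.inl h)
      · rcases List.mem_cons.mp hx with rfl | hx
        · exact Or.inl (Or.inr ⟨y, hy, rfl⟩)
        · exact Or.inr ⟨x, hx, y, hy, rfl⟩

lemma foldl_max_map {α : Type} (l : List α) (g : α → Int) (b : Int) :
    l.foldl (fun acc x => max acc (g x)) b = (l.map g).foldl max b := by
  induction l generalizing b with
  | nil => rfl
  | cons a t ih => simp [List.foldl_cons, ih]

lemma foldl_foldl_max {α : Type} (l : List α) (g : α → List Int) (b : Int) :
    l.foldl (fun acc x => (g x).foldl max acc) b = (l.flatMap g).foldl max b := by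
  induction l generalizing b with
  | nil => rfl
  | cons a t ih => simp [List.foldl_cons, List.flatMap_cons, List.foldl_append, ih]

-- a nested running max is the max over the flattened list of candidate values
lemma nested_shape {α β : Type} (out : List α) (inn : α → List β) (f : α → β → Int) :
    out.foldl (fun best i => (inn i).foldl (fun best j => max best (f i j)) best) 0
    = (out.flatMap (fun i => (inn i).map (f i))).foldl max 0 := by
  have h1 : out.foldl (fun best i => (inn i).foldl (fun best j => max best (f i j)) best) 0
      = out.foldl (fun acc i => ((inn i).map (f i)).foldl max acc) 0 :=
    PySem.List.foldl_congr_mem out _ _ 0 (fun acc i _ => foldl_max_map (inn i) (f i) acc)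
  rw [h1]
  exact foldl_foldl_max out (fun i => (inn i).map (f i)) 0

lemma foldl_max_zero_le (A B : List Int) (h : ∀ a ∈ A, ∃ b ∈ B, a ≤ b) :
    A.foldl max 0 ≤ B.foldl max 0 := by
  rcases PySem.List.foldl_max_mem A 0 with hA | hA
  · rw [hA]; exact (PySem.List.le_foldl_max B 0).1
  · rcases h _ hA with ⟨b, hb, hab⟩
    exact le_trans hab ((PySem.List.le_foldl_max B 0).2 b hb)

lemma foldl_max_zero_eq (A B : List Int) (hAB : ∀ a ∈ A, ∃ b ∈ B, a ≤ b)
    (hBA : ∀ b ∈ B, ∃ a ∈ A, b ≤ a) : A.foldl max 0 = B.foldl max 0 :=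
  le_antisymm (foldl_max_zero_le A B hAB) (foldl_max_zero_le B A hBA)

-- proof-side abbreviations for the two candidate-value lists
def lsOf (R : Int) (X Y : List Int) : List Int :=
  X.foldl (fun s x => Y.foldl (fun s y => PySem.Set.add s (maskA R (X.zip Y) x y)) s)
    PySem.Set.empty

def FOf (ls : List Int) (i j : Int) : Int :=
  ((PySem.Int.bitCount (PySem.Int.bor (PySem.List.pyGetD ls i 0) (PySem.List.pyGetD ls j 0)) : Nat) : Int)

def GOf (R : Int) (pts : List (Int × Int)) (c1 c2 : Int × Int) : Int :=
  ((pts.countP (fun p => insideB R c1.1 c1.2 p || insideB R c2.1 c2.2 p) : Nat) : Int)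

def valsA (R : Int) (X Y : List Int) : List Int :=
  (PySem.List.pyRange 0 ((lsOf R X Y).length : Int) 1).flatMap
    (fun i => (PySem.List.pyRange i ((lsOf R X Y).length : Int) 1).map (FOf (lsOf R X Y) i))

def valsB (R : Int) (X Y : List Int) : List Int :=
  (X.flatMap (fun x => Y.map (fun y => (x, y)))).flatMap
    (fun c1 => (X.flatMap (fun x => Y.map (fun y => (x, y)))).map (GOf R (X.zip Y) c1))

lemma mem_lsOf (R : Int) (X Y : List Int) (m : Int) :
    m ∈ lsOf R X Y ↔ ∃ x ∈ X, ∃ y ∈ Y, m = maskA R (X.zip Y) x y := by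
  rw [lsOf, mem_set_fold]
  simp [PySem.Set.empty]

lemma solve_eq_valsA (N R : Int) (X Y : List Int) :
    solve N R X Y = (valsA R X Y).foldl max 0 := by
  show (PySem.List.pyRange 0 ((lsOf R X Y).length : Int) 1).foldl
      (fun best i => (PySem.List.pyRange i ((lsOf R X Y).length : Int) 1).foldl
        (fun best j => max best (FOf (lsOf R X Y) i j)) best) 0
    = _
  exact nested_shape _ _ _

lemma solve_alt_eq_valsB (N R : Int) (X Y : List Int) :
    solve_alt N R X Y = (valsB R X Y).foldl max 0 := by
  show (X.flatMap (fun x => Y.map (fun y => (x, y)))).foldl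
      (fun best c1 => (X.flatMap (fun x => Y.map (fun y => (x, y)))).foldl
        (fun best c2 => max best (GOf R (X.zip Y) c1 c2)) best) 0
    = _
  exact nested_shape _ _ _

lemma mem_corners (X Y : List Int) (c : Int × Int) :
    c ∈ X.flatMap (fun x => Y.map (fun y => (x, y))) ↔ c.1 ∈ X ∧ c.2 ∈ Y := by
  simp only [List.mem_flatMap, List.mem_map]
  constructor
  · rintro ⟨x, hx, y, hy, rfl⟩; exact ⟨hx, hy⟩
  · rintro ⟨h1, h2⟩; exact ⟨c.1, h1, c.2, h2, rfl⟩

-- F on two mask values = G on the two generating corners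
lemma F_eq_G (R : Int) (X Y : List Int) (x1 y1 x2 y2 : Int) :
    ((PySem.Int.bitCount (PySem.Int.bor (maskA R (X.zip Y) x1 y1) (maskA R (X.zip Y) x2 y2)) : Nat) : Int)
    = GOf R (X.zip Y) (x1, y1) (x2, y2) := pair_value R (X.zip Y) x1 y1 x2 y2

lemma mem_valsA (R : Int) (X Y : List Int) (a : Int) (ha : a ∈ valsA R X Y) :
    ∃ m1 ∈ lsOf R X Y, ∃ m2 ∈ lsOf R X Y,
      a = ((PySem.Int.bitCount (PySem.Int.bor m1 m2) : Nat) : Int) := by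
  rw [valsA] at ha
  rw [List.mem_flatMap] at ha
  obtain ⟨i, hi, ha⟩ := ha
  rw [List.mem_map] at ha
  obtain ⟨j, hj, rfl⟩ := ha
  rw [PySem.List.mem_pyRange_one] at hi hj
  set ls := lsOf R X Y
  have hi2 : PySem.List.pyGetD ls i 0 ∈ ls := by
    rw [PySem.List.pyGetD_eq_getElem ls 0 hi.1 hi.2]
    exact List.getElem_mem _
  have hj2 : PySem.List.pyGetD ls j 0 ∈ ls := by
    rw [PySem.List.pyGetD_eq_getElem ls 0 (le_trans hi.1 hj.1) hj.2]
    exact List.getElem_mem _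
  exact ⟨_, hi2, _, hj2, rfl⟩

lemma valsA_le_valsB (R : Int) (X Y : List Int) (a : Int) (ha : a ∈ valsA R X Y) :
    ∃ b ∈ valsB R X Y, a ≤ b := by
  obtain ⟨m1, hm1, m2, hm2, rfl⟩ := mem_valsA R X Y a ha
  rw [mem_lsOf] at hm1 hm2
  obtain ⟨x1, hx1, y1, hy1, rfl⟩ := hm1
  obtain ⟨x2, hx2, y2, hy2, rfl⟩ := hm2
  refine ⟨GOf R (X.zip Y) (x1, y1) (x2, y2), ?_, le_of_eq (F_eq_G R X Y x1 y1 x2 y2)⟩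
  rw [valsB, List.mem_flatMap]
  exact ⟨(x1, y1), (mem_corners X Y _).mpr ⟨hx1, hy1⟩,
    List.mem_map.mpr ⟨(x2, y2), (mem_corners X Y _).mpr ⟨hx2, hy2⟩, rfl⟩⟩

lemma valsB_le_valsA (R : Int) (X Y : List Int) (b : Int) (hb : b ∈ valsB R X Y) :
    ∃ a ∈ valsA R X Y, b ≤ a := by
  rw [valsB, List.mem_flatMap] at hb
  obtain ⟨c1, hc1, hb⟩ := hb
  rw [List.mem_map] at hb
  obtain ⟨c2, hc2, rfl⟩ := hb
  rw [mem_corners] at hc1 hc2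
  set ls := lsOf R X Y with hls
  have hm1 : maskA R (X.zip Y) c1.1 c1.2 ∈ ls :=
    (mem_lsOf R X Y _).mpr ⟨c1.1, hc1.1, c1.2, hc1.2, rfl⟩
  have hm2 : maskA R (X.zip Y) c2.1 c2.2 ∈ ls :=
    (mem_lsOf R X Y _).mpr ⟨c2.1, hc2.1, c2.2, hc2.2, rfl⟩
  obtain ⟨n1, hn1, he1⟩ := List.getElem_of_mem hm1
  obtain ⟨n2, hn2, he2⟩ := List.getElem_of_mem hm2
  -- the ordered index pair (min, max) is scanned by A's triangular loop
  have key : ∀ (i j : Nat), i < ls.length → j < ls.length → i ≤ j →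
      ∀ v, v = FOf ls (i : Int) (j : Int) → v ∈ valsA R X Y := by
    intro i j hi hj hij v hv
    rw [valsA, List.mem_flatMap]
    refine ⟨(i : Int), ?_, List.mem_map.mpr ⟨(j : Int), ?_, hv.symm⟩⟩
    · rw [PySem.List.mem_pyRange_one]
      constructor
      · exact Int.natCast_nonneg i
      · exact_mod_cast hi
    · rw [PySem.List.mem_pyRange_one]
      constructor
      · exact_mod_cast hij
      · exact_mod_cast hj
  have hgetD : ∀ (k : Nat) (h : k < ls.length), PySem.List.pyGetD ls (k : Int) 0 = ls[k] := by
    intro k h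
    rw [PySem.List.pyGetD_eq_getElem ls 0 (Int.natCast_nonneg k) (by exact_mod_cast h)]
    simp
  rcases le_total n1 n2 with hle | hle
  · refine ⟨FOf ls (n1 : Int) (n2 : Int), key n1 n2 hn1 hn2 hle _ rfl, le_of_eq ?_⟩
    rw [FOf, hgetD n1 hn1, hgetD n2 hn2, he1, he2]
    exact (pair_value R (X.zip Y) c1.1 c1.2 c2.1 c2.2).symm
  · refine ⟨FOf ls (n2 : Int) (n1 : Int), key n2 n1 hn2 hn1 hle _ rfl, le_of_eq ?_⟩
    rw [FOf, hgetD n2 hn2, hgetD n1 hn1, he1, he2, PySem.Int.bor_comm]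
    exact (pair_value R (X.zip Y) c1.1 c1.2 c2.1 c2.2).symm

-- ===== VERDICT (by name: the statement is the Claim_ definition above) =====
theorem solve_spec : Claim_equal_solve := by
  intro N R X Y _
  unfold Spec_solve
  rw [solve_eq_valsA N R X Y, solve_alt_eq_valsB N R X Y]
  exact foldl_max_zero_eq _ _ (valsA_le_valsB R X Y) (valsB_le_valsA R X Y)
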